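-- pv_equiv track=rewrite | github.com/mmh132/ProjectEuler | solves/P240.py | finddivset
-- ===== SOURCE A (Python) =====
-- from math import factorial as f
--
-- def finddivset(setnums):
--     setnums = sorted(setnums)
--     absnum = [1]
--     ptr = 0
--     for i in range(0, len(setnums)-1):
--         if setnums[i] == setnums[i+1]:
--             absnum[ptr] += 1
--         else:
--             ptr+=1
--             absnum.append(1)
--     div = 1
--     for i in range(len(absnum)): div*=f(absnum[i])
--     return div
-- ===== SOURCE B (Python) =====
-- def finddivset(setnums):
--     setnums = sorted(setnums)
--     div = 1
--     run = 1
--     for i in range(1, len(setnums)):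
--         if setnums[i] == setnums[i - 1]:
--             run += 1
--             div *= run
--         else:
--             run = 1
--     return div
-- ===== Notes on version B (the rewrite author's own statement) =====
-- stated objective: simpler
-- what changed: B folds the factorial product into the single counting pass over the sorted list with two scalars (current run length and running product), eliminating the counts list, the pointer bookkeeping and all math.factorial calls.
import Mathlib
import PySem

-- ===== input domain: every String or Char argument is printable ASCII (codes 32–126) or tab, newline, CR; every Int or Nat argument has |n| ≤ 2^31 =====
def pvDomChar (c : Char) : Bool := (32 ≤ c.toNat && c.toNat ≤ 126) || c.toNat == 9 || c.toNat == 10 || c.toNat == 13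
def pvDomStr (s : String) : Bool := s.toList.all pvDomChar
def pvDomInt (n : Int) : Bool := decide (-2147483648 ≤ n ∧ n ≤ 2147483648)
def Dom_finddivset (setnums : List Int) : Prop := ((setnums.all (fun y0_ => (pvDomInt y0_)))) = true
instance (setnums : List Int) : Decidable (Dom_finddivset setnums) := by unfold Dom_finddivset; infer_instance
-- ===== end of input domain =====

-- B folds the factorial product into the single counting pass over the sorted list
-- (two scalars: run length and running product), removing the counts list and the factorial calls.


-- ===== PORT A =====
-- math.factorial; exact for n ≥ 0 (the only arguments A feeds it)
def pyFact (n : Int) : Int := (Nat.factorial n.toNat : Int)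

def finddivset (setnums : List Int) : Int :=
  let s := PySem.List.sorted setnums (fun x => x) false
  let st := (PySem.List.pyRange 0 (PySem.List.len s - 1) 1).foldl
    (fun (st : List Int × Int) i =>
      if PySem.List.pyGetD s i 0 == PySem.List.pyGetD s (i + 1) 0 then
        (PySem.List.pySetD st.1 st.2 (PySem.List.pyGetD st.1 st.2 0 + 1), st.2)
      else
        (st.1 ++ [1], st.2 + 1))
    ([1], 0)
  (PySem.List.pyRange 0 (PySem.List.len st.1) 1).foldl
    (fun div i => div * pyFact (PySem.List.pyGetD st.1 i 0)) 1

-- ===== PORT B =====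
def finddivset_alt (setnums : List Int) : Int :=
  let s := PySem.List.sorted setnums (fun x => x) false
  ((PySem.List.pyRange 1 (PySem.List.len s) 1).foldl
    (fun (st : Int × Int) i =>
      if PySem.List.pyGetD s i 0 == PySem.List.pyGetD s (i - 1) 0 then
        (st.1 * (st.2 + 1), st.2 + 1)
      else
        (st.1, 1))
    (1, 1)).1

-- ===== PRECONDITION & SPEC =====
def Spec_finddivset (setnums : List Int) (out : Int) : Prop := out = finddivset_alt setnums
instance (setnums : List Int) (out : Int) : Decidable (Spec_finddivset setnums out) := by unfold Spec_finddivset; infer_instance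

-- ===== CLAIM (what is proved, stated in full; the proofs are below) =====
def Claim_equal_finddivset : Prop := ∀ (setnums : List Int), Dom_finddivset setnums → Spec_finddivset setnums (finddivset setnums)

-- ===== LEMMAS AND PROOFS =====

-- the loop bodies, abstracted over the adjacency boolean
def pvStepA (st : List Int × Int) (b : Bool) : List Int × Int :=
  if b then (PySem.List.pySetD st.1 st.2 (PySem.List.pyGetD st.1 st.2 0 + 1), st.2)
  else (st.1 ++ [1], st.2 + 1)

def pvStepB (st : Int × Int) (b : Bool) : Int × Int :=
  if b then (st.1 * (st.2 + 1), st.2 + 1) else (st.1, 1)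

def pvProdFact (xs : List Int) : Int := xs.foldl (fun d x => d * pyFact x) 1

theorem pvProdFact_append (xs : List Int) (x : Int) :
    pvProdFact (xs ++ [x]) = pvProdFact xs * pyFact x := by
  simp [pvProdFact, List.foldl_append]

theorem pvFactSucc (r : Int) (hr : 0 ≤ r) : pyFact (r + 1) = pyFact r * (r + 1) := by
  unfold pyFact
  have h1 : (r + 1).toNat = r.toNat + 1 := by omega
  rw [h1, Nat.factorial_succ]
  push_cast
  have h2 : ((r.toNat : Int)) = r := by omega
  rw [h2]; ring

theorem pvSetLast (L : List Int) (r v : Int) :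
    (L ++ [r]).set L.length v = L ++ [v] := by
  induction L with
  | nil => rfl
  | cons a t ih => simp [ih]

theorem pvInvariant (bs : List Bool) :
    ∃ (L : List Int) (r : Int),
      bs.foldl pvStepA ([1], 0) = (L ++ [r], (L.length : Int)) ∧
      bs.foldl pvStepB (1, 1) = (pvProdFact (L ++ [r]), r) ∧ 1 ≤ r := by
  induction bs using List.reverseRecOn with
  | nil => exact ⟨[], 1, by decide, by decide, by decide⟩
  | append_singleton bs b ih =>
      obtain ⟨L, r, hA, hB, hr⟩ := ih
      rw [List.foldl_append, List.foldl_append, hA, hB]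
      simp only [List.foldl_cons, List.foldl_nil]
      cases b with
      | false =>
          refine ⟨L ++ [r], 1, ?_, ?_, by decide⟩
          · simp [pvStepA]
          · have h1 : pyFact 1 = 1 := by decide
            rw [pvProdFact_append (L ++ [r]) 1, h1]
            simp [pvStepB]
      | true =>
          refine ⟨L, r + 1, ?_, ?_, by omega⟩
          · have hget : PySem.List.pyGetD (L ++ [r]) (L.length : Int) 0 = r := by
              rw [PySem.List.pyGetD_natCast]
              simp
            have hset : PySem.List.pySetD (L ++ [r]) (L.length : Int) (r + 1) = L ++ [r + 1] := by
              rw [PySem.List.pySetD_natCast, pvSetLast]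
            simp [pvStepA, hget, hset]
          · simp only [pvStepB, if_true, pvProdFact_append,
              pvFactSucc r (by omega : (0 : Int) ≤ r), Prod.mk.injEq]
            exact ⟨by ring, trivial⟩

theorem pvBeqComm (a b : Int) : (a == b) = (b == a) := by
  by_cases h : a = b
  · simp [h]
  · simp [h, Ne.symm h]

-- the two ports read the same list of adjacency booleans
theorem pvBsEq (s : List Int) :
    (PySem.List.pyRange 1 (PySem.List.len s) 1).map
        (fun i => PySem.List.pyGetD s i 0 == PySem.List.pyGetD s (i - 1) 0) =
    (PySem.List.pyRange 0 (PySem.List.len s - 1) 1).map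
        (fun i => PySem.List.pyGetD s i 0 == PySem.List.pyGetD s (i + 1) 0) := by
  rw [PySem.List.pyRange_one, PySem.List.pyRange_one]
  have hlen : ((PySem.List.len s : Int) - 1 - 0).toNat = ((PySem.List.len s : Int) - 1).toNat := by
    omega
  rw [hlen]
  simp only [List.map_map]
  apply List.map_congr_left
  intro k _
  simp only [Function.comp]
  have h1 : (1 : Int) + (k : Int) - 1 = 0 + (k : Int) := by ring
  have h2 : (1 : Int) + (k : Int) = 0 + (k : Int) + 1 := by ring
  rw [h1, h2, pvBeqComm]

-- ===== VERDICT (by name: the statement is the Claim_ definition above) =====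
theorem finddivset_spec : Claim_equal_finddivset := by
  intro setnums _
  show finddivset setnums = finddivset_alt setnums
  simp only [finddivset, finddivset_alt]
  set s := PySem.List.sorted setnums (fun x => x) false with hs
  obtain ⟨L, r, hA, hB, hr⟩ := pvInvariant
    ((PySem.List.pyRange 0 (PySem.List.len s - 1) 1).map
      (fun i => PySem.List.pyGetD s i 0 == PySem.List.pyGetD s (i + 1) 0))
  have eA :
      List.foldl pvStepA (([1], 0) : List Int × Int)
        ((PySem.List.pyRange 0 (PySem.List.len s - 1) 1).map
          (fun i => PySem.List.pyGetD s i 0 == PySem.List.pyGetD s (i + 1) 0))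
      = List.foldl
          (fun st i => pvStepA st (PySem.List.pyGetD s i 0 == PySem.List.pyGetD s (i + 1) 0))
          ([1], 0) (PySem.List.pyRange 0 (PySem.List.len s - 1) 1) := by
    rw [List.foldl_map]
  have eB :
      List.foldl pvStepB (((1 : Int), (1 : Int)))
        ((PySem.List.pyRange 1 (PySem.List.len s) 1).map
          (fun i => PySem.List.pyGetD s i 0 == PySem.List.pyGetD s (i - 1) 0))
      = List.foldl
          (fun st i => pvStepB st (PySem.List.pyGetD s i 0 == PySem.List.pyGetD s (i - 1) 0))
          (1, 1) (PySem.List.pyRange 1 (PySem.List.len s) 1) := by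
    rw [List.foldl_map]
  rw [pvBsEq] at eB
  have hAfold :
      List.foldl
        (fun (st : List Int × Int) i =>
          if PySem.List.pyGetD s i 0 == PySem.List.pyGetD s (i + 1) 0 then
            (PySem.List.pySetD st.1 st.2 (PySem.List.pyGetD st.1 st.2 0 + 1), st.2)
          else (st.1 ++ [1], st.2 + 1))
        ([1], 0) (PySem.List.pyRange 0 (PySem.List.len s - 1) 1)
      = (L ++ [r], (L.length : Int)) := eA.symm.trans hA
  have hBfold :
      List.foldl
        (fun (st : Int × Int) i =>
          if PySem.List.pyGetD s i 0 == PySem.List.pyGetD s (i - 1) 0 then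
            (st.1 * (st.2 + 1), st.2 + 1)
          else (st.1, 1))
        (1, 1) (PySem.List.pyRange 1 (PySem.List.len s) 1)
      = (pvProdFact (L ++ [r]), r) := eB.symm.trans hB
  rw [hAfold, hBfold]
  dsimp only
  simp only [PySem.List.len_eq]
  rw [PySem.List.foldl_pyRange_zero_pyGetD' (L ++ [r]) 0 (fun d x => d * pyFact x) 1]
  rfl
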